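-- pv_equiv track=rewrite | github.com/darrenzhang2000/binarysearch | 20210729/mixedSorting.py | solve
-- ===== SOURCE A (Python) =====
-- def solve(nums):
--     indices = sorted([i for i in range(len(nums)) if nums[i] % 2 == 1])
--     values = list(reversed(sorted([n for n in nums if n % 2 == 1])))
--     for i in range(len(values)):
--         idxToInsert = indices[i]
--         nums[idxToInsert] = values[i]
--
--     indices = sorted([i for i in range(len(nums)) if nums[i] % 2 == 0])
--     values = (sorted([n for n in nums if n % 2 == 0]))
--     for i in range(len(values)):
--         idxToInsert = indices[i]
--         nums[idxToInsert] = values[i]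
--     return nums
-- ===== SOURCE B (Python) =====
-- def solve(nums):
--     # Selection instead of sorting: repeatedly extract the max remaining odd /
--     # min remaining even and place it at the next position of that parity.
--     odds = [x for x in nums if x % 2 == 1]
--     evens = [x for x in nums if x % 2 == 0]
--     for i, x in enumerate(nums):
--         if x % 2 == 1:
--             v = max(odds)
--             odds.remove(v)
--         else:
--             v = min(evens)
--             evens.remove(v)
--         nums[i] = v
--     return nums
-- ===== Notes on version B (the rewrite author's own statement) =====
-- stated objective: alternative
-- what changed: A sorts the odd/even values and scatters them over two sorted index lists in two staged passes; B does no sorting at all: it keeps the two parity multisets and, in one pass over the positions, repeatedly extracts the maximum remaining odd or minimum remaining even (selection) and writes it in place.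
import Mathlib
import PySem

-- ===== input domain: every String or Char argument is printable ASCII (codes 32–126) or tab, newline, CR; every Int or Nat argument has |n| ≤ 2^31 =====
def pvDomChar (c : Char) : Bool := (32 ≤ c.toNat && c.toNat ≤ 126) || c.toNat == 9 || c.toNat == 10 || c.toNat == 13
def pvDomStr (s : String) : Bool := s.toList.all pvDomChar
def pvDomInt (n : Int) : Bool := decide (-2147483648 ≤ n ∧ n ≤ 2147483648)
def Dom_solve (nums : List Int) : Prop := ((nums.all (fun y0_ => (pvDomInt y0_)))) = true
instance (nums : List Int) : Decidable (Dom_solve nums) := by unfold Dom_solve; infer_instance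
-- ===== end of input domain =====

-- B replaces A's sort-then-scatter (two staged passes over sorted index lists) by sorting-free
-- selection: one pass over the positions extracting the max remaining odd / min remaining even
-- (objective: alternative algorithm, same quadratic cost here).
-- Note: the Python A (and B) mutate nums in place; the equivalence proved here is about the return value.

-- ===== PORT A =====
-- literal transliteration of A; indices[i] / values[i] are always in range (the two lists have
-- equal length and indices come from range(len(nums))), so pyGetD/pySetD are exact here.
def solve (nums : List Int) : List Int :=
  let indices := PySem.List.sorted ((PySem.List.pyRange 0 (nums.length : Int)).filter
      (fun i => PySem.Int.mod (PySem.List.pyGetD nums i 0) 2 == 1)) (fun x => x) false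
  let values := (PySem.List.sorted (nums.filter (fun n => PySem.Int.mod n 2 == 1)) (fun x => x) false).reverse
  let nums1 := (PySem.List.pyRange 0 (values.length : Int)).foldl
      (fun acc i => PySem.List.pySetD acc (PySem.List.pyGetD indices i 0) (PySem.List.pyGetD values i 0)) nums
  let indices2 := PySem.List.sorted ((PySem.List.pyRange 0 (nums1.length : Int)).filter
      (fun i => PySem.Int.mod (PySem.List.pyGetD nums1 i 0) 2 == 0)) (fun x => x) false
  let values2 := PySem.List.sorted (nums1.filter (fun n => PySem.Int.mod n 2 == 0)) (fun x => x) false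
  (PySem.List.pyRange 0 (values2.length : Int)).foldl
      (fun acc i => PySem.List.pySetD acc (PySem.List.pyGetD indices2 i 0) (PySem.List.pyGetD values2 i 0)) nums1

-- ===== PORT B =====
-- Source B's loop: at each position of the matching parity, v = max(odds) / min(evens) is extracted
-- (list.remove = first occurrence = List.erase). max/min raise on an empty list, but the parity
-- multiset is nonempty whenever an element of that parity is reached, so the getD defaults are
-- never the result on reached inputs; remove? is exact via remove?_eq_some_erase.
def fillSel : List Int → List Int → List Int → List Int
  | [], _, _ => []
  | x :: xs, od, ev =>
    if PySem.Int.mod x 2 == 1 then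
      let v := (PySem.List.max? od (fun y => y)).getD 0
      v :: fillSel xs ((PySem.List.remove? od v).getD od) ev
    else
      let v := (PySem.List.min? ev (fun y => y)).getD 0
      v :: fillSel xs od ((PySem.List.remove? ev v).getD ev)

def solve_alt (nums : List Int) : List Int :=
  fillSel nums
    (nums.filter (fun x => PySem.Int.mod x 2 == 1))
    (nums.filter (fun x => PySem.Int.mod x 2 == 0))

-- ===== PRECONDITION & SPEC =====
def Spec_solve (nums : List Int) (out : List Int) : Prop := out = solve_alt nums
instance (nums : List Int) (out : List Int) : Decidable (Spec_solve nums out) := by unfold Spec_solve; infer_instance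

-- ===== CLAIM (what is proved, stated in full; the proofs are below) =====
def Claim_equal_solve : Prop := ∀ (nums : List Int), Dom_solve nums → Spec_solve nums (solve nums)

-- ===== LEMMAS AND PROOFS =====

-- intermediate form: consume the pre-sorted odds (descending) / evens (ascending) head by head
def fillB : List Int → List Int → List Int → List Int
  | [], _, _ => []
  | x :: xs, od, ev =>
    if PySem.Int.mod x 2 == 1 then od.headI :: fillB xs od.tail ev
    else ev.headI :: fillB xs od ev.tail

-- replace the p-positions of xs, left to right, by the successive elements of vs
def repl (p : Int → Bool) : List Int → List Int → List Int
  | [], _ => []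
  | x :: xs, vs => if p x then vs.headI :: repl p xs vs.tail else x :: repl p xs vs

-- the list of p-positions of xs, as A's comprehension computes it
def idxP (p : Int → Bool) (xs : List Int) : List Int :=
  (PySem.List.pyRange 0 (xs.length : Int)).filter (fun i => p (PySem.List.pyGetD xs i 0))

lemma idxP_nil (p : Int → Bool) : idxP p [] = [] := rfl

lemma getD_succ (l : List Int) (a k0 : Int) (k : Nat) :
    PySem.List.pyGetD (a :: l) ((k : Int) + 1) k0 = PySem.List.pyGetD l (k : Int) k0 := by
  have h1 : ((k:Int)+1) = ((k+1 : Nat) : Int) := by push_cast; ring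
  rw [h1, PySem.List.pyGetD_natCast, PySem.List.pyGetD_natCast]; rfl

lemma idxP_cons (p : Int → Bool) (x : Int) (xs : List Int) :
    idxP p (x :: xs) = (if p x then [(0 : Int)] else []) ++ (idxP p xs).map (· + 1) := by
  unfold idxP
  rw [PySem.List.pyRange_zero_natCast, PySem.List.pyRange_zero_natCast]
  simp only [List.length_cons, List.range_succ_eq_map, List.map_cons, List.map_map,
    List.filter_cons, List.filter_map]
  have hget0 : PySem.List.pyGetD (x :: xs) ((0:Nat) : Int) 0 = x := by
    rw [PySem.List.pyGetD_natCast]; rfl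
  rw [hget0]
  have hf : List.filter ((fun i => p (PySem.List.pyGetD (x :: xs) i 0)) ∘ (fun k : Nat => (k:Int)) ∘ Nat.succ)
      (List.range xs.length)
      = List.filter ((fun i => p (PySem.List.pyGetD xs i 0)) ∘ (fun k : Nat => (k:Int))) (List.range xs.length) :=
    List.filter_congr (fun k _ => by simp [Function.comp, getD_succ, List.getD])
  have hm : ∀ l : List Nat, List.map ((fun k : Nat => (k:Int)) ∘ Nat.succ) l
      = List.map ((fun x : Int => x + 1) ∘ (fun k : Nat => (k:Int))) l := by
    intro l; apply List.map_congr_left; intro k _; simp [Function.comp]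
  by_cases hx : p x <;> simp [hx, hf, hm]

lemma idxP_nonneg (p : Int → Bool) (xs : List Int) : ∀ i ∈ idxP p xs, 0 ≤ i := by
  intro i hi
  have := List.mem_of_mem_filter hi
  exact (PySem.List.mem_pyRange_one.mp this).1

lemma length_idxP (p : Int → Bool) (xs : List Int) :
    (idxP p xs).length = (xs.filter p).length := by
  induction xs with
  | nil => rfl
  | cons x xs ih =>
    rw [idxP_cons]
    by_cases h : p x <;> simp [h, ih]

lemma sorted_idxP (p : Int → Bool) (xs : List Int) :
    PySem.List.sorted (idxP p xs) (fun x => x) false = idxP p xs := by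
  apply PySem.List.sorted_eq_of_perm_of_pairwise_lt _ _ _ (List.Perm.refl _)
  exact List.Pairwise.filter _ (PySem.List.pairwise_lt_pyRange_one 0 (xs.length : Int))

-- the fold over range(len(values)) reading indices[i], values[i] is the fold over their zip
lemma foldl_range_zip (is vs xs : List Int) (h : is.length = vs.length) :
    (PySem.List.pyRange 0 (vs.length : Int)).foldl
      (fun acc i => PySem.List.pySetD acc (PySem.List.pyGetD is i 0) (PySem.List.pyGetD vs i 0)) xs
    = (is.zip vs).foldl (fun acc q => PySem.List.pySetD acc q.1 q.2) xs := by
  rw [PySem.List.pyRange_zero_natCast, List.foldl_map]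
  induction vs generalizing is xs with
  | nil => simp
  | cons v vs ih =>
    obtain ⟨i0, is', rfl⟩ := List.exists_cons_of_ne_nil (show is ≠ [] by intro h0; rw [h0] at h; simp at h)
    rw [List.length_cons, List.range_succ_eq_map, List.foldl_cons, List.foldl_map]
    have h1 : PySem.List.pySetD xs (PySem.List.pyGetD (i0 :: is') ((0:Nat) : Int) 0)
        (PySem.List.pyGetD (v :: vs) ((0:Nat) : Int) 0) = PySem.List.pySetD xs i0 v := by
      rw [PySem.List.pyGetD_natCast, PySem.List.pyGetD_natCast]; rfl
    have h2 : ∀ (acc : List Int) (k : Nat),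
        PySem.List.pySetD acc (PySem.List.pyGetD (i0 :: is') ((Nat.succ k : Nat) : Int) 0)
          (PySem.List.pyGetD (v :: vs) ((Nat.succ k : Nat) : Int) 0)
        = PySem.List.pySetD acc (PySem.List.pyGetD is' ((k:Nat) : Int) 0)
          (PySem.List.pyGetD vs ((k:Nat) : Int) 0) := by
      intro acc k
      have hc : ((Nat.succ k : Nat) : Int) = (k : Int) + 1 := by push_cast; ring
      rw [hc, getD_succ, getD_succ]
    calc (List.range vs.length).foldl
          (fun acc k => PySem.List.pySetD acc (PySem.List.pyGetD (i0 :: is') ((Nat.succ k : Nat) : Int) 0)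
            (PySem.List.pyGetD (v :: vs) ((Nat.succ k : Nat) : Int) 0))
          (PySem.List.pySetD xs (PySem.List.pyGetD (i0 :: is') ((0:Nat) : Int) 0)
            (PySem.List.pyGetD (v :: vs) ((0:Nat) : Int) 0))
        = (List.range vs.length).foldl
          (fun acc k => PySem.List.pySetD acc (PySem.List.pyGetD is' ((k:Nat) : Int) 0)
            (PySem.List.pyGetD vs ((k:Nat) : Int) 0)) (PySem.List.pySetD xs i0 v) := by
          rw [h1]; exact List.foldl_ext _ _ _ (fun acc k _ => h2 acc k)
      _ = ((is'.zip vs).foldl (fun acc q => PySem.List.pySetD acc q.1 q.2) (PySem.List.pySetD xs i0 v)) :=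
          ih is' _ (by simpa using h)
      _ = _ := by simp

-- setting at shifted (nonnegative) positions leaves the head alone
lemma foldl_set_shift (l : List (Int × Int)) (x : Int) (t : List Int)
    (h : ∀ q ∈ l, 0 ≤ q.1) :
    l.foldl (fun acc q => PySem.List.pySetD acc (q.1 + 1) q.2) (x :: t)
    = x :: l.foldl (fun acc q => PySem.List.pySetD acc q.1 q.2) t := by
  induction l generalizing t x with
  | nil => rfl
  | cons q l ih =>
    have h0 : 0 ≤ q.1 := h q (List.mem_cons_self ..)
    have hset : PySem.List.pySetD (x :: t) (q.1 + 1) q.2 = x :: PySem.List.pySetD t q.1 q.2 := by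
      rw [PySem.List.pySetD_of_nonneg _ _ (by omega), PySem.List.pySetD_of_nonneg _ _ h0]
      have : (q.1 + 1).toNat = q.1.toNat + 1 := by omega
      rw [this]; rfl
    simp only [List.foldl_cons, hset]
    exact ih _ _ (fun r hr => h r (List.mem_cons_of_mem _ hr))

-- the scatter loop, as a fold over (indices, values) pairs, is repl
lemma scatter_eq_repl (p : Int → Bool) (xs vs : List Int)
    (h : vs.length = (xs.filter p).length) :
    ((idxP p xs).zip vs).foldl (fun acc q => PySem.List.pySetD acc q.1 q.2) xs = repl p xs vs := by
  induction xs generalizing vs with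
  | nil => simp [idxP_nil, repl]
  | cons x xs ih =>
    rw [idxP_cons]
    have hshift : ∀ (vs' t : List Int),
        List.foldl (fun acc q => PySem.List.pySetD acc q.1 q.2) t (((idxP p xs).map (· + 1)).zip vs')
        = List.foldl (fun acc q => PySem.List.pySetD acc (q.1 + 1) q.2) t ((idxP p xs).zip vs') := by
      intro vs' t
      rw [List.zip_map_left, List.foldl_map]
      rfl
    by_cases hx : p x
    · have hne : vs ≠ [] := by
        intro h0; rw [h0] at h; simp [hx] at h
      obtain ⟨v, vs', rfl⟩ := List.exists_cons_of_ne_nil hne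
      simp only [hx, if_true, List.cons_append, List.nil_append, List.zip_cons_cons, List.foldl_cons]
      have hset : PySem.List.pySetD (x :: xs) 0 v = v :: xs := by
        rw [PySem.List.pySetD_of_nonneg _ _ le_rfl]; rfl
      rw [hset, hshift vs' (v :: xs), foldl_set_shift _ _ _
        (fun q hq => idxP_nonneg p xs q.1 ((List.of_mem_zip (by simpa using hq)).1)),
        ih vs' (by simpa [List.filter_cons, hx] using h)]
      simp [repl, hx]
    · simp only [hx, Bool.false_eq_true, if_false, List.nil_append]
      rw [hshift vs (x :: xs), foldl_set_shift _ _ _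
        (fun q hq => idxP_nonneg p xs q.1 ((List.of_mem_zip (by simpa using hq)).1)),
        ih vs (by simpa [List.filter_cons, hx] using h)]
      simp [repl, hx]

-- replacing p-positions by p-values does not change the q-filtered sublist, for q disjoint from p
lemma filter_repl (p q : Int → Bool) (hpq : ∀ v, p v = true → q v = false)
    (xs od : List Int) (hod : ∀ v ∈ od, p v = true)
    (hlen : od.length = (xs.filter p).length) :
    (repl p xs od).filter q = xs.filter q := by
  induction xs generalizing od with
  | nil => rfl
  | cons x xs ih =>
    by_cases hx : p x
    · have hne : od ≠ [] := by
        intro h0; rw [h0] at hlen; simp [hx] at hlen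
      obtain ⟨o, os, rfl⟩ := List.exists_cons_of_ne_nil hne
      have hlen' : os.length = (xs.filter p).length := by
        simpa [List.filter_cons, hx] using hlen
      simp only [repl, hx, if_true, List.headI, List.tail_cons, List.filter_cons,
        hpq o (hod o (List.mem_cons_self ..)), hpq x hx]
      exact ih os (fun v hv => hod v (List.mem_cons_of_mem _ hv)) hlen'
    · simp only [repl, hx, if_false, Bool.false_eq_true, List.filter_cons]
      rw [ih od hod (by simpa [List.filter_cons, hx] using hlen)]

-- the two repl passes compose into the single dispatching pass fillB
lemma repl_repl_eq_fillB (xs od ev : List Int)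
    (hod : ∀ v ∈ od, (PySem.Int.mod v 2 == 1) = true)
    (hlen : od.length = (xs.filter (fun n => PySem.Int.mod n 2 == 1)).length) :
    repl (fun n => PySem.Int.mod n 2 == 0)
      (repl (fun n => PySem.Int.mod n 2 == 1) xs od) ev = fillB xs od ev := by
  induction xs generalizing od ev with
  | nil => rfl
  | cons x xs ih =>
    by_cases hx : (PySem.Int.mod x 2 == 1) = true
    · have hfc : List.filter (fun n => PySem.Int.mod n 2 == 1) (x :: xs)
          = x :: List.filter (fun n => PySem.Int.mod n 2 == 1) xs := by
        simp only [List.filter_cons, hx, if_true]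
      have hne : od ≠ [] := by
        intro h0; rw [h0, hfc] at hlen; simp at hlen
      obtain ⟨o, os, rfl⟩ := List.exists_cons_of_ne_nil hne
      have ho : (PySem.Int.mod o 2 == 1) = true := hod o (List.mem_cons_self ..)
      have hoe : (PySem.Int.mod o 2 == 0) = false := by
        have h1 : PySem.Int.mod o 2 = 1 := by
          rcases PySem.Int.mod_two_eq o with h | h
          · rw [h] at ho; simp at ho
          · exact h
        rw [h1]; decide
      simp only [repl, fillB, hx, if_true, List.headI, List.tail_cons, hoe,
        Bool.false_eq_true, if_false]
      exact congrArg _ (ih os ev (fun v hv => hod v (List.mem_cons_of_mem _ hv))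
        (by rw [hfc] at hlen; simp only [List.length_cons] at hlen; omega))
    · have hx' : (PySem.Int.mod x 2 == 1) = false := by simpa using hx
      have hfc : List.filter (fun n => PySem.Int.mod n 2 == 1) (x :: xs)
          = List.filter (fun n => PySem.Int.mod n 2 == 1) xs := by
        simp only [List.filter_cons, hx', Bool.false_eq_true, if_false]
      have hxe : (PySem.Int.mod x 2 == 0) = true := by
        rcases PySem.Int.mod_two_eq x with h | h
        · rw [h]; decide
        · exact absurd (by rw [h]; decide) hx
      simp only [repl, fillB, hx', Bool.false_eq_true, if_false, hxe, if_true]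
      exact congrArg _ (ih od ev.tail hod (by rw [hfc] at hlen; exact hlen))

-- A's scatter pass (sorted index comprehension + fold over range) is repl
lemma pass_eq_repl (p : Int → Bool) (xs vs : List Int) (hv : vs.length = (xs.filter p).length) :
    (PySem.List.pyRange 0 (vs.length : Int)).foldl
      (fun acc i => PySem.List.pySetD acc
        (PySem.List.pyGetD (PySem.List.sorted ((PySem.List.pyRange 0 (xs.length : Int)).filter
          (fun i => p (PySem.List.pyGetD xs i 0))) (fun x => x) false) i 0)
        (PySem.List.pyGetD vs i 0)) xs = repl p xs vs := by
  show (PySem.List.pyRange 0 (vs.length : Int)).foldl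
      (fun acc i => PySem.List.pySetD acc
        (PySem.List.pyGetD (PySem.List.sorted (idxP p xs) (fun x => x) false) i 0)
        (PySem.List.pyGetD vs i 0)) xs = repl p xs vs
  rw [sorted_idxP, foldl_range_zip _ _ _ (by rw [length_idxP]; exact hv.symm)]
  exact scatter_eq_repl p xs vs hv

-- max(l) extracted from the back of sorted(l): sorted l = sorted (l.erase m) ++ [m]
lemma sorted_eq_append_max (l : List Int) (m : Int)
    (hm : PySem.List.max? l (fun y => y) = some m) :
    PySem.List.sorted l (fun x => x) false
      = PySem.List.sorted (l.erase m) (fun x => x) false ++ [m] := by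
  apply PySem.List.sorted_id_eq_of_perm_of_pairwise
  · exact (((PySem.List.sorted_perm _ _ _).append_right _).trans
      (List.perm_append_singleton _ _)).trans (List.perm_cons_erase (PySem.List.max?_mem hm)).symm
  · rw [List.pairwise_append]
    refine ⟨PySem.List.sorted_pairwise _ _, List.pairwise_singleton _ _, ?_⟩
    intro a ha b hb
    rw [List.mem_singleton] at hb; subst hb
    exact PySem.List.max?_isMax hm a (List.mem_of_mem_erase ((PySem.List.mem_sorted _ _ _ _).mp ha))

-- min(l) extracted from the front of sorted(l): sorted l = m :: sorted (l.erase m)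
lemma sorted_eq_cons_min (l : List Int) (m : Int)
    (hm : PySem.List.min? l (fun y => y) = some m) :
    PySem.List.sorted l (fun x => x) false
      = m :: PySem.List.sorted (l.erase m) (fun x => x) false := by
  apply PySem.List.sorted_id_eq_of_perm_of_pairwise
  · exact ((PySem.List.sorted_perm _ _ _).cons m).trans (List.perm_cons_erase (PySem.List.min?_mem hm)).symm
  · rw [List.pairwise_cons]
    refine ⟨?_, PySem.List.sorted_pairwise _ _⟩
    intro a ha
    exact PySem.List.min?_isMin hm a (List.mem_of_mem_erase ((PySem.List.mem_sorted _ _ _ _).mp ha))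

-- B's selection pass equals consuming the pre-sorted lists head by head
lemma fillSel_eq_fillB (xs od ev : List Int) :
    fillSel xs od ev
      = fillB xs ((PySem.List.sorted od (fun x => x) false).reverse)
               (PySem.List.sorted ev (fun x => x) false) := by
  induction xs generalizing od ev with
  | nil => rfl
  | cons x xs ih =>
    by_cases hx : (PySem.Int.mod x 2 == 1) = true
    · rcases eq_or_ne od [] with rfl | hne
      · simp only [fillSel, fillB, hx, if_true]
        exact congrArg _ (ih [] ev)
      · obtain ⟨m, hm⟩ : ∃ m, PySem.List.max? od (fun y => y) = some m := by
          cases h : PySem.List.max? od (fun y => y) with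
          | none => exact absurd ((PySem.List.max?_eq_none_iff od _).mp h) hne
          | some m => exact ⟨m, rfl⟩
        have hrem : (PySem.List.remove? od m).getD od = od.erase m :=
          by rw [PySem.List.remove?_eq_some_erase od m (PySem.List.max?_mem hm)]; rfl
        have hsort : (PySem.List.sorted od (fun x => x) false).reverse
            = m :: (PySem.List.sorted (od.erase m) (fun x => x) false).reverse := by
          rw [sorted_eq_append_max od m hm, List.reverse_append]; rfl
        simp only [fillSel, fillB, hx, if_true, hm, Option.getD_some, hrem, hsort,
          List.headI, List.tail_cons]
        exact congrArg _ (ih (od.erase m) ev)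
    · rcases eq_or_ne ev [] with rfl | hne
      · simp only [fillSel, fillB, hx, Bool.false_eq_true, if_false]
        exact congrArg _ (ih od [])
      · obtain ⟨m, hm⟩ : ∃ m, PySem.List.min? ev (fun y => y) = some m := by
          cases h : PySem.List.min? ev (fun y => y) with
          | none => exact absurd ((PySem.List.min?_eq_none_iff ev _).mp h) hne
          | some m => exact ⟨m, rfl⟩
        have hrem : (PySem.List.remove? ev m).getD ev = ev.erase m :=
          by rw [PySem.List.remove?_eq_some_erase ev m (PySem.List.min?_mem hm)]; rfl
        have hsort : PySem.List.sorted ev (fun x => x) false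
            = m :: PySem.List.sorted (ev.erase m) (fun x => x) false :=
          sorted_eq_cons_min ev m hm
        simp only [fillSel, fillB, hx, Bool.false_eq_true, if_false, hm, Option.getD_some,
          hrem, hsort, List.headI, List.tail_cons]
        exact congrArg _ (ih od (ev.erase m))

-- ===== VERDICT =====
theorem solve_spec : Claim_equal_solve := by
  intro nums _
  show solve nums = solve_alt nums
  unfold solve solve_alt
  simp only []
  set od := (PySem.List.sorted (nums.filter (fun n => PySem.Int.mod n 2 == 1)) (fun x => x) false).reverse with hdef
  have hodmem : ∀ v ∈ od, (fun n => PySem.Int.mod n 2 == 1) v = true := by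
    intro v hv
    rw [hdef, List.mem_reverse, PySem.List.mem_sorted, List.mem_filter] at hv
    exact hv.2
  have hodlen : od.length = (nums.filter (fun n => PySem.Int.mod n 2 == 1)).length := by
    rw [hdef, List.length_reverse, PySem.List.length_sorted]
  have h1 := pass_eq_repl (fun n => PySem.Int.mod n 2 == 1) nums od hodlen
  rw [h1]
  set ys := repl (fun n => PySem.Int.mod n 2 == 1) nums od with hys
  have h2 := pass_eq_repl (fun n => PySem.Int.mod n 2 == 0) ys
    (PySem.List.sorted (ys.filter (fun n => PySem.Int.mod n 2 == 0)) (fun x => x) false)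
    (PySem.List.length_sorted _ _ _)
  rw [h2]
  have h3 : ys.filter (fun n => PySem.Int.mod n 2 == 0)
      = nums.filter (fun n => PySem.Int.mod n 2 == 0) := by
    rw [hys]
    exact filter_repl _ _ (fun v hv => by
        rcases PySem.Int.mod_two_eq v with h | h
        · rw [h] at hv; simp at hv
        · rw [h]; decide)
      nums od hodmem hodlen
  rw [h3, hys, repl_repl_eq_fillB nums od _ hodmem hodlen, fillSel_eq_fillB, hdef]
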